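-- pv_equiv track=rewrite | github.com/maxlegrec1/ChessDecoder | scripts/think.py | board_tokens_to_fen
-- ===== SOURCE A (Python) =====
-- _PIECE_SYMBOLS = {
--     "white_king": "K", "white_queen": "Q", "white_rook": "R",
--     "white_bishop": "B", "white_knight": "N", "white_pawn": "P",
--     "black_king": "k", "black_queen": "q", "black_rook": "r",
--     "black_bishop": "b", "black_knight": "n", "black_pawn": "p",
-- }
--
-- def board_tokens_to_fen(tokens):
--     """Reconstruct FEN from 68 token strings."""
--     if len(tokens) != 68:
--         return "<invalid>"
--     squares = tokens[1:65]
--     fen_rows = []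
--     for rank in range(7, -1, -1):
--         row = ""
--         empty = 0
--         for file in range(8):
--             piece = squares[rank * 8 + file]
--             sym = _PIECE_SYMBOLS.get(piece)
--             if sym:
--                 if empty > 0:
--                     row += str(empty); empty = 0
--                 row += sym
--             else:
--                 empty += 1
--         if empty > 0:
--             row += str(empty)
--         fen_rows.append(row)
--     castling = tokens[66] if tokens[66] != "no_castling_rights" else "-"
--     stm = "w" if tokens[67] == "white_to_move" else "b"
--     return f"{'/'.join(fen_rows)} {stm} {castling} - 0 1"
-- ===== SOURCE B (Python) =====
-- _PIECE_SYMBOLS = {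
--     "white_king": "K", "white_queen": "Q", "white_rook": "R",
--     "white_bishop": "B", "white_knight": "N", "white_pawn": "P",
--     "black_king": "k", "black_queen": "q", "black_rook": "r",
--     "black_bishop": "b", "black_knight": "n", "black_pawn": "p",
-- }
--
--
-- def _compress(cells):
--     """Run-length compress the '.' sentinels of one rank into digit counts."""
--     out = []
--     i = 0
--     n = len(cells)
--     while i < n:
--         if cells[i] == ".":
--             j = i
--             while j < n and cells[j] == ".":
--                 j += 1
--             out.append(str(j - i))
--             i = j
--         else:
--             out.append(cells[i])
--             i += 1
--     return "".join(out)
--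
--
-- def board_tokens_to_fen(tokens):
--     """Reconstruct FEN from 68 token strings."""
--     if len(tokens) != 68:
--         return "<invalid>"
--     squares = tokens[1:65]
--     fen_rows = [
--         _compress([_PIECE_SYMBOLS.get(p, ".") for p in squares[rank * 8:rank * 8 + 8]])
--         for rank in range(7, -1, -1)
--     ]
--     castling = tokens[66] if tokens[66] != "no_castling_rights" else "-"
--     stm = "w" if tokens[67] == "white_to_move" else "b"
--     return f"{'/'.join(fen_rows)} {stm} {castling} - 0 1"
-- ===== Notes on version B (the rewrite author's own statement) =====
-- stated objective: alternative
-- what changed: Instead of threading a row-string plus empty-counter state through the file loop, B first maps each square to its symbol with '.' as sentinel for empties, then run-length-compresses the '.' runs into digit counts in a second pass.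
import Mathlib
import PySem

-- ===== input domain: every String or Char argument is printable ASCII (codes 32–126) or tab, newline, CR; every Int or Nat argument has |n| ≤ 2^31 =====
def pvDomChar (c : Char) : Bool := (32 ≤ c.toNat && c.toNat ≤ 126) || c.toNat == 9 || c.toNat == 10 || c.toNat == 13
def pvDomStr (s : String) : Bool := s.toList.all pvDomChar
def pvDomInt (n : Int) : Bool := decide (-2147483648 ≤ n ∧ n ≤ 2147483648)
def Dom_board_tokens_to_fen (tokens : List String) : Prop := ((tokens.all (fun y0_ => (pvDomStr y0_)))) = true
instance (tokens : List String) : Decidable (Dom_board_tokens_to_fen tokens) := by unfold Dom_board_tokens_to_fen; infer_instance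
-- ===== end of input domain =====

-- B replaces A's row-string + empty-counter loop state by a map to '.'-sentinel symbols
-- followed by a separate run-length compression pass (objective: alternative decomposition).

-- ===== PORT A =====
-- the module constant _PIECE_SYMBOLS (shared by both Pythons)
def pieceSyms : PySem.Dict String String :=
  PySem.Dict.ofList
    [("white_king", "K"), ("white_queen", "Q"), ("white_rook", "R"),
     ("white_bishop", "B"), ("white_knight", "N"), ("white_pawn", "P"),
     ("black_king", "k"), ("black_queen", "q"), ("black_rook", "r"),
     ("black_bishop", "b"), ("black_knight", "n"), ("black_pawn", "p")]

-- the body of A's inner 'for file in range(8)' loop; every dict value is a nonempty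
-- string, so Python's truthiness test 'if sym:' is exactly the some/none match here
def stepA (st : String × Int) (piece : String) : String × Int :=
  match PySem.Dict.get? pieceSyms piece with
  | some sym => ((if st.2 > 0 then st.1 ++ PySem.Int.toStr st.2 else st.1) ++ sym, 0)
  | none => (st.1, st.2 + 1)

def board_tokens_to_fen (tokens : List String) : String :=
  if tokens.length ≠ 68 then "<invalid>" else
    let squares := PySem.List.slice tokens (some 1) (some 65)
    let fen_rows := (PySem.List.pyRange 7 (-1) (-1)).foldl (fun rows rank =>
      let st := (PySem.List.pyRange 0 8 1).foldl
        (fun st file => stepA st (PySem.List.pyGetD squares (rank * 8 + file) "")) ("", 0)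
      let row := if st.2 > 0 then st.1 ++ PySem.Int.toStr st.2 else st.1
      rows ++ [row]) []
    let castling := if PySem.List.pyGetD tokens 66 "" ≠ "no_castling_rights"
                    then PySem.List.pyGetD tokens 66 "" else "-"
    let stm := if PySem.List.pyGetD tokens 67 "" = "white_to_move" then "w" else "b"
    PySem.Str.join "/" fen_rows ++ " " ++ stm ++ " " ++ castling ++ " - 0 1"

-- ===== PORT B =====
-- port of Source B's _compress: scan for runs of the '.' sentinel, emit each run's length as digits
def compress : List String → String
  | [] => ""
  | c :: rest =>
    if c == "." then
      PySem.Int.toStr (1 + (rest.takeWhile (· == ".")).length) ++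
        compress (rest.dropWhile (· == "."))
    else c ++ compress rest
termination_by cs => cs.length
decreasing_by
  · exact Nat.lt_succ_of_le (List.length_dropWhile_le _ _)
  · simp

def board_tokens_to_fen_alt (tokens : List String) : String :=
  if tokens.length ≠ 68 then "<invalid>" else
    let squares := PySem.List.slice tokens (some 1) (some 65)
    let fen_rows := (PySem.List.pyRange 7 (-1) (-1)).map (fun rank =>
      compress ((PySem.List.slice squares (some (rank * 8)) (some (rank * 8 + 8))).map
        (fun p => PySem.Dict.getD pieceSyms p ".")))
    let castling := if PySem.List.pyGetD tokens 66 "" ≠ "no_castling_rights"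
                    then PySem.List.pyGetD tokens 66 "" else "-"
    let stm := if PySem.List.pyGetD tokens 67 "" = "white_to_move" then "w" else "b"
    PySem.Str.join "/" fen_rows ++ " " ++ stm ++ " " ++ castling ++ " - 0 1"

-- ===== PRECONDITION & SPEC =====
def Spec_board_tokens_to_fen (tokens : List String) (out : String) : Prop := out = board_tokens_to_fen_alt tokens
instance (tokens : List String) (out : String) : Decidable (Spec_board_tokens_to_fen tokens out) := by unfold Spec_board_tokens_to_fen; infer_instance

-- ===== CLAIM (what is proved, stated in full; the proofs are below) =====
def Claim_equal_board_tokens_to_fen : Prop := ∀ (tokens : List String), Dom_board_tokens_to_fen tokens → Spec_board_tokens_to_fen tokens (board_tokens_to_fen tokens)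

-- ===== LEMMAS AND PROOFS =====

-- A's pending-empties counter, threaded through B's compression
def flushStr (e : Int) : String := if e > 0 then PySem.Int.toStr e else ""

def compressFrom (e : Int) : List String → String
  | [] => flushStr e
  | c :: rest =>
    if c == "." then compressFrom (e + 1) rest
    else flushStr e ++ c ++ compressFrom 0 rest

-- no piece symbol is the '.' sentinel
lemma pieceSyms_get_ne_dot (p s : String) (h : PySem.Dict.get? pieceSyms p = some s) :
    s ≠ "." := by
  have h2 := PySem.Dict.mem_items_of_get?_eq_some _ h
  have : pieceSyms.items =
    [("white_king", "K"), ("white_queen", "Q"), ("white_rook", "R"),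
     ("white_bishop", "B"), ("white_knight", "N"), ("white_pawn", "P"),
     ("black_king", "k"), ("black_queen", "q"), ("black_rook", "r"),
     ("black_bishop", "b"), ("black_knight", "n"), ("black_pawn", "p")] := by decide
  rw [this] at h2
  simp at h2
  rcases h2 with ⟨_,h2⟩|⟨_,h2⟩|⟨_,h2⟩|⟨_,h2⟩|⟨_,h2⟩|⟨_,h2⟩|⟨_,h2⟩|⟨_,h2⟩|⟨_,h2⟩|⟨_,h2⟩|⟨_,h2⟩|⟨_,h2⟩ <;> subst h2 <;> decide

-- A's indexed inner loop over range(8) is a fold over the 8-square chunk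
lemma fold_idx (xs : List String) (a : Int) (n : Nat) (st : String × Int)
    (ha : 0 ≤ a) (h : a.toNat + n ≤ xs.length) :
    (PySem.List.pyRange 0 (n : Int) 1).foldl
        (fun st j => stepA st (PySem.List.pyGetD xs (a + j) "")) st
      = ((xs.drop a.toNat).take n).foldl stepA st := by
  induction n generalizing st with
  | zero => simp [PySem.List.pyRange_one_eq_nil]
  | succ n ih =>
    have hcast : ((n + 1 : Nat) : Int) = (n : Int) + 1 := by push_cast; ring
    rw [hcast, PySem.List.pyRange_one_succ_right (by positivity), List.foldl_append]
    rw [ih st (by omega)]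
    have hlt : a.toNat + n < xs.length := by omega
    have h1 : PySem.List.pyGetD xs (a + (n : Int)) "" = xs[a.toNat + n] := by
      rw [show a + (n : Int) = ((a.toNat + n : Nat) : Int) by omega, PySem.List.pyGetD_natCast]
      exact List.getD_eq_getElem _ _ hlt
    have h2 : (xs.drop a.toNat).take (n + 1) = (xs.drop a.toNat).take n ++ [xs[a.toNat + n]] := by
      rw [List.take_add_one]
      congr 1
      have : (xs.drop a.toNat)[n]? = some xs[a.toNat + n] := by
        rw [List.getElem?_drop]
        exact List.getElem?_eq_getElem hlt
      simp [this]
    rw [h2, List.foldl_append]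
    simp [h1]

-- A's counter loop over a chunk, flushed at the end, is B's sentinel-map compression
lemma chunk_eq (chunk : List String) : ∀ st : String × Int, 0 ≤ st.2 →
    (if (chunk.foldl stepA st).2 > 0
     then (chunk.foldl stepA st).1 ++ PySem.Int.toStr (chunk.foldl stepA st).2
     else (chunk.foldl stepA st).1)
      = st.1 ++ compressFrom st.2 (chunk.map (fun p => PySem.Dict.getD pieceSyms p ".")) := by
  induction chunk with
  | nil =>
    intro st he
    simp [compressFrom, flushStr]
    split_ifs <;> simp
  | cons p rest ih =>
    intro st he
    simp only [List.foldl_cons, List.map_cons]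
    rcases hg : PySem.Dict.get? pieceSyms p with _ | s
    · have hd : PySem.Dict.getD pieceSyms p "." = "." := by
        rw [PySem.Dict.getD_eq_get?_getD, hg]; rfl
      rw [hd]
      have hstep : stepA st p = (st.1, st.2 + 1) := by simp [stepA, hg]
      rw [hstep, ih (st.1, st.2 + 1) (by omega)]
      simp [compressFrom]
    · have hd : PySem.Dict.getD pieceSyms p "." = s := by
        rw [PySem.Dict.getD_eq_get?_getD, hg]; rfl
      have hne : (s == ".") = false := by
        simp [pieceSyms_get_ne_dot p s hg]
      have hstep : stepA st p = (st.1 ++ flushStr st.2 ++ s, 0) := by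
        simp [stepA, hg, flushStr]
        split_ifs <;> simp
      rw [hd, hstep, ih (st.1 ++ flushStr st.2 ++ s, 0) (by omega)]
      simp [compressFrom, hne, String.append_assoc]

lemma compress_lead (cs : List String) :
    flushStr (((cs.takeWhile (· == ".")).length : Nat) : Int) ++ compress (cs.dropWhile (· == "."))
      = compress cs := by
  cases cs with
  | nil => simp [flushStr, compress]
  | cons c rest =>
    by_cases hc : (c == ".") = true
    · rw [show compress (c :: rest)
          = PySem.Int.toStr (1 + ((rest.takeWhile (· == ".")).length : Int)) ++
              compress (rest.dropWhile (· == ".")) by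
        rw [compress]; simp [hc]]
      simp only [List.takeWhile_cons, List.dropWhile_cons, hc, if_true]
      simp [flushStr]
      congr 1
      ring
    · have hc' : (c == ".") = false := by simpa using hc
      simp [List.dropWhile_cons, hc', flushStr]

lemma compressFrom_eq (cs : List String) : ∀ e : Int, 0 ≤ e →
    compressFrom e cs
      = flushStr (e + ((cs.takeWhile (· == ".")).length : Int)) ++
          compress (cs.dropWhile (· == ".")) := by
  induction cs with
  | nil => intro e he; simp [compressFrom, compress]
  | cons c rest ih =>
    intro e he
    by_cases hc : (c == ".") = true
    · rw [show compressFrom e (c :: rest) = compressFrom (e + 1) rest by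
        simp [compressFrom, hc]]
      rw [ih (e + 1) (by omega)]
      simp [hc]
      ring_nf
    · have hc' : (c == ".") = false := by simpa using hc
      rw [show compressFrom e (c :: rest) = flushStr e ++ c ++ compressFrom 0 rest by
        simp [compressFrom, hc']]
      rw [ih 0 le_rfl]
      simp [hc']
      rw [show compress (c :: rest) = c ++ compress rest by
        rw [compress]; simp [hc']]
      rw [← compress_lead rest]
      simp [String.append_assoc]

lemma compressFrom_zero (cs : List String) : compressFrom 0 cs = compress cs := by
  rw [compressFrom_eq cs 0 le_rfl]
  simpa using compress_lead cs

lemma ports_agree (tokens : List String) :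
    board_tokens_to_fen tokens = board_tokens_to_fen_alt tokens := by
  unfold board_tokens_to_fen board_tokens_to_fen_alt
  by_cases h : tokens.length = 68
  · conv_lhs => rw [if_neg (not_ne_iff.mpr h)]
    conv_rhs => rw [if_neg (not_ne_iff.mpr h)]
    have hrows : (PySem.List.pyRange 7 (-1) (-1)).foldl (fun rows rank =>
        rows ++ [(fun st : String × Int =>
          if st.2 > 0 then st.1 ++ PySem.Int.toStr st.2 else st.1)
          ((PySem.List.pyRange 0 8 1).foldl
            (fun st file => stepA st
              (PySem.List.pyGetD (PySem.List.slice tokens (some 1) (some 65)) (rank * 8 + file) ""))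
            ("", 0))]) []
        = (PySem.List.pyRange 7 (-1) (-1)).map (fun rank =>
            compress ((PySem.List.slice (PySem.List.slice tokens (some 1) (some 65))
                (some (rank * 8)) (some (rank * 8 + 8))).map
              (fun p => PySem.Dict.getD pieceSyms p "."))) := by
      rw [PySem.List.foldl_append_singleton_eq_map]
      rw [List.nil_append]
      apply List.map_congr_left
      intro rank hr
      rw [PySem.List.mem_pyRange_neg_one] at hr
      set squares := PySem.List.slice tokens (some 1) (some 65) with hsq
      have hlen : squares.length = 64 := by
        rw [hsq, PySem.List.slice_toNat (ha := by norm_num) (hb := by norm_num)]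
        simp [h]
      have hnn : 0 ≤ rank * 8 := by omega
      have hle : (rank * 8).toNat + 8 ≤ squares.length := by omega
      have hfold := fold_idx squares (rank * 8) 8 ("", 0) hnn hle
      norm_num at hfold
      rw [hfold]
      have hslice : PySem.List.slice squares (some (rank * 8)) (some (rank * 8 + 8))
          = (squares.drop (rank * 8).toNat).take 8 := by
        rw [PySem.List.slice_toNat (ha := hnn) (hb := by omega)]
        congr 1
        omega
      rw [hslice]
      have hch := chunk_eq ((squares.drop (rank * 8).toNat).take 8) ("", 0) (by norm_num)
      simp only at hch ⊢
      rw [hch, compressFrom_zero]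
      simp
    exact congrArg (fun r => PySem.Str.join "/" r ++ " " ++
      (if PySem.List.pyGetD tokens 67 "" = "white_to_move" then "w" else "b") ++ " " ++
      (if PySem.List.pyGetD tokens 66 "" ≠ "no_castling_rights"
       then PySem.List.pyGetD tokens 66 "" else "-") ++ " - 0 1") hrows
  · rw [if_pos h, if_pos h]

-- ===== VERDICT (by name: the statement is the Claim_ definition above) =====
theorem board_tokens_to_fen_spec : Claim_equal_board_tokens_to_fen := by
  intro tokens _
  unfold Spec_board_tokens_to_fen
  exact ports_agree tokens
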